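-- pv_equiv track=rewrite | github.com/jerryxu20/aoc23 | 09/b.py | solve
-- ===== SOURCE A (Python) =====
-- def solve(v):
--     zero = True
--     for d in v:
--         if d != 0: zero = False
--     if zero:
--         return 0
--
--     delta = []
--     for i in range(1, len(v)):
--         delta.append(v[i] - v[i - 1])
--     b = solve(delta)
--     return b + v[-1]
-- ===== SOURCE B (Python) =====
-- def solve(v):
--     # Closed form: next term = sum_{k=1}^{n} (-1)^(k+1) * C(n,k) * v[n-k], one linear pass.
--     n = len(v)
--     total = 0
--     c = 1
--     k = 0
--     for x in reversed(v):
--         k += 1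
--         c = c * (n - k + 1) // k          # running binomial C(n,k); division is exact
--         total += c * x if k % 2 == 1 else -c * x
--     return total
-- ===== Notes on version B (the rewrite author's own statement) =====
-- stated objective: faster
-- what changed: Replaces the recursive build of O(n) difference rows by the closed-form alternating binomial sum next = sum_{k=1}^{n} (-1)^(k+1) C(n,k) v[n-k], computed in one linear pass with a running binomial coefficient.
import Mathlib
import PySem

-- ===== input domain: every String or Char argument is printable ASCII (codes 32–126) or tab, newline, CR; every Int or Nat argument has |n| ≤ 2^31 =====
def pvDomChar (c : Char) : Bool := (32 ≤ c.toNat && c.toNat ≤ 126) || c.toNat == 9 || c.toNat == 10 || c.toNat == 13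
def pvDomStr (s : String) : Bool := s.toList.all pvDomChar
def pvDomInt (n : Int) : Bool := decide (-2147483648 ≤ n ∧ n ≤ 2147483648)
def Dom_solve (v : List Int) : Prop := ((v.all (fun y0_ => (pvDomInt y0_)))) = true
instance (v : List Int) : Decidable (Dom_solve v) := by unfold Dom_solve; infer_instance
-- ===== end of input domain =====

-- B replaces A's recursive difference-table construction by the closed-form
-- alternating binomial sum computed in one linear pass (same return value).

-- ===== PORT A =====
-- the delta list A builds: [v[i] - v[i-1] for i in range(1, len(v))]
-- (indices are always in range here, so pyGetD with default 0 is exact)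
def dltA (v : List Int) : List Int :=
  (PySem.List.pyRange 1 v.length 1).map
    (fun i => PySem.List.pyGetD v i 0 - PySem.List.pyGetD v (i - 1) 0)

lemma dltA_length_lt (v : List Int) (h : 1 ≤ v.length) : (dltA v).length < v.length := by
  simp [dltA, PySem.List.length_pyRange_one]
  omega

def solve (v : List Int) : Int :=
  let zero := v.foldl (fun z d => if d ≠ 0 then false else z) true
  if h : zero = true then 0
  else
    solve (dltA v) + PySem.List.pyGetD v (-1) 0
termination_by v.length
decreasing_by
  refine dltA_length_lt v ?_
  rcases v with _ | ⟨x, xs⟩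
  · exact absurd rfl h
  · simp

-- ===== PORT B =====
-- loop body of Source B: state (total, c, k)
def bstep (n : Int) (st : Int × Int × Int) (x : Int) : Int × Int × Int :=
  let k := st.2.2 + 1
  let c := PySem.Int.floordiv (st.2.1 * (n - k + 1)) k
  (st.1 + (if PySem.Int.mod k 2 = 1 then c * x else -(c * x)), c, k)

def solve_alt (v : List Int) : Int :=
  (v.reverse.foldl (bstep v.length) (0, 1, 0)).1

-- ===== PRECONDITION & SPEC =====
def Spec_solve (v : List Int) (out : Int) : Prop := out = solve_alt v
instance (v : List Int) (out : Int) : Decidable (Spec_solve v out) := by unfold Spec_solve; infer_instance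

-- ===== CLAIM (what is proved, stated in full; the proofs are below) =====
def Claim_equal_solve : Prop := ∀ (v : List Int), Dom_solve v → Spec_solve v (solve v)

-- ===== LEMMAS AND PROOFS =====

-- running binomial coefficient: one exact division step
lemma cstep (n t : Nat) :
    PySem.Int.floordiv ((n.choose t : Int) * ((n : Int) - (t : Int))) ((t : Int) + 1)
      = (n.choose (t + 1) : Int) := by
  by_cases h : n ≤ t
  · have hz : (n.choose t : Int) * ((n : Int) - (t : Int)) = 0 := by
      rcases eq_or_lt_of_le h with he | hlt
      · subst he; simp
      · simp [Nat.choose_eq_zero_of_lt hlt]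
    rw [hz, PySem.Int.floordiv_eq_ediv_of_pos (by positivity)]
    simp [Nat.choose_eq_zero_of_lt (by omega : n < t + 1)]
  · have hsub : (n : Int) - (t : Int) = ((n - t : Nat) : Int) := by omega
    have hnat : n.choose t * (n - t) = n.choose (t + 1) * (t + 1) :=
      (Nat.choose_succ_right_eq n t).symm
    have hprod : (n.choose t : Int) * ((n - t : Nat) : Int)
        = ((n.choose (t + 1) * (t + 1) : Nat) : Int) := by exact_mod_cast hnat
    have hdiv : ((t : Int) + 1) = ((t + 1 : Nat) : Int) := by push_cast; ring
    rw [hsub, hprod, hdiv, PySem.Int.floordiv_natCast]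
    norm_cast
    exact Nat.mul_div_cancel _ (by omega)

-- the parity branch is an alternating sign
lemma signstep (t : Nat) (y : Int) :
    (if PySem.Int.mod ((t : Int) + 1) 2 = 1 then y else -y) = (-1) ^ t * y := by
  have hm : PySem.Int.mod ((t : Int) + 1) 2 = (((t + 1) % 2 : Nat) : Int) := by
    rw [PySem.Int.mod_eq_emod_of_pos (by norm_num)]
    push_cast
    ring_nf
  by_cases hp : t % 2 = 0
  · rw [hm, if_pos (by norm_cast; omega)]
    rw [Even.neg_one_pow (Nat.even_iff.mpr hp), one_mul]
  · rw [hm, if_neg (by norm_cast; omega)]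
    rw [Odd.neg_one_pow (Nat.odd_iff.mpr (by omega))]
    ring

-- full characterisation of B's fold
lemma bfold (n : Nat) (l : List Int) : ∀ (t : Nat) (total : Int),
    l.foldl (bstep (n : Int)) (total, (n.choose t : Int), (t : Int))
      = (total + ∑ j ∈ Finset.range l.length,
            (-1) ^ (t + j) * (n.choose (t + j + 1) : Int) * l.getD j 0,
         (n.choose (t + l.length) : Int), ((t + l.length : Nat) : Int)) := by
  induction l with
  | nil => simp
  | cons x l ih =>
    intro t total
    rw [List.foldl_cons]
    have harg : (n : Int) - ((t : Int) + 1) + 1 = (n : Int) - (t : Int) := by ring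
    have hb : bstep (n : Int) (total, (n.choose t : Int), (t : Int)) x
        = (total + (-1) ^ t * ((n.choose (t + 1) : Int) * x),
           (n.choose (t + 1) : Int), ((t + 1 : Nat) : Int)) := by
      simp only [bstep, harg, cstep n t, signstep t ((n.choose (t + 1) : Int) * x)]
      simp only [Prod.mk.injEq]
      refine ⟨trivial, trivial, ?_⟩
      push_cast
      ring
    rw [hb, ih (t + 1) (total + (-1) ^ t * ((n.choose (t + 1) : Int) * x))]
    have hsum : total + (-1) ^ t * ((n.choose (t + 1) : Int) * x)
          + ∑ j ∈ Finset.range l.length,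
              (-1) ^ (t + 1 + j) * (n.choose (t + 1 + j + 1) : Int) * l.getD j 0
        = total + ∑ j ∈ Finset.range (x :: l).length,
              (-1) ^ (t + j) * (n.choose (t + j + 1) : Int) * (x :: l).getD j 0 := by
      rw [List.length_cons, Finset.sum_range_succ']
      have hterm : ∀ j, (-1 : Int) ^ (t + 1 + j) * (n.choose (t + 1 + j + 1) : Int) * l.getD j 0
          = (-1) ^ (t + (j + 1)) * (n.choose (t + (j + 1) + 1) : Int) * (x :: l).getD (j + 1) 0 := by
        intro j
        have e : t + 1 + j = t + (j + 1) := by omega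
        rw [List.getD_cons_succ, e]
      rw [Finset.sum_congr rfl (fun j _ => hterm j)]
      simp only [List.getD_cons_zero, Nat.add_zero]
      ring
    rw [hsum]
    have hk : t + 1 + l.length = t + (x :: l).length := by simp; omega
    rw [hk]

lemma alt_eq (v : List Int) :
    solve_alt v = ∑ j ∈ Finset.range v.length,
      (-1) ^ j * (v.length.choose (j + 1) : Int) * v.getD (v.length - 1 - j) 0 := by
  unfold solve_alt
  have h0 : ((0 : Int), (1 : Int), (0 : Int))
      = ((0 : Int), (v.length.choose 0 : Int), ((0 : Nat) : Int)) := by simp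
  rw [h0, bfold v.length v.reverse 0 0]
  simp only [List.length_reverse, zero_add]
  refine Finset.sum_congr rfl ?_
  intro j hj
  have hj' : j < v.length := Finset.mem_range.mp hj
  congr 1
  rw [List.getD_eq_getElem?_getD, List.getD_eq_getElem?_getD, List.getElem?_reverse hj']

-- Pascal step for the alternating binomial sum
lemma pascalS (m : Nat) (W : Nat → Int) :
    ∑ j ∈ Finset.range (m + 1), (-1) ^ j * ((m + 1).choose (j + 1) : Int) * W j
      = (∑ j ∈ Finset.range m, (-1) ^ j * (m.choose (j + 1) : Int) * (W j - W (j + 1))) + W 0 := by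
  have expand : ∀ j, (-1 : Int) ^ j * (((m + 1).choose (j + 1) : Nat) : Int) * W j
      = (-1) ^ j * (m.choose (j + 1) : Int) * W j + (-1) ^ j * (m.choose j : Int) * W j := by
    intro j
    rw [Nat.choose_succ_succ]
    push_cast
    ring
  rw [Finset.sum_congr rfl (fun j _ => expand j), Finset.sum_add_distrib,
    Finset.sum_range_succ, Nat.choose_succ_self, Finset.sum_range_succ']
  have lneg : ∀ j, (-1 : Int) ^ (j + 1) * (m.choose (j + 1) : Int) * W (j + 1)
      = -((-1) ^ j * (m.choose (j + 1) : Int) * W (j + 1)) := by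
    intro j; rw [pow_succ]; ring
  rw [Finset.sum_congr rfl (fun j _ => lneg j), Finset.sum_neg_distrib]
  have rhs' : ∀ j, (-1 : Int) ^ j * (m.choose (j + 1) : Int) * (W j - W (j + 1))
      = (-1) ^ j * (m.choose (j + 1) : Int) * W j
        - (-1) ^ j * (m.choose (j + 1) : Int) * W (j + 1) := fun j => by ring
  rw [Finset.sum_congr rfl (fun j _ => rhs' j), Finset.sum_sub_distrib]
  simp
  ring

lemma flag_false_fix (v : List Int) :
    v.foldl (fun z d => if d ≠ 0 then false else z) false = false := by
  induction v with
  | nil => rfl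
  | cons x xs ih =>
    rw [List.foldl_cons]
    have hstep : (if x ≠ 0 then false else false) = false := by split <;> rfl
    rw [hstep]; exact ih

lemma flag_iff (v : List Int) :
    (v.foldl (fun z d => if d ≠ 0 then false else z) true = true) ↔ ∀ d ∈ v, d = 0 := by
  induction v with
  | nil => simp
  | cons x xs ih =>
    rw [List.foldl_cons]
    by_cases hx : x = 0
    · rw [if_neg (by simp [hx])]
      rw [ih]
      simp [hx]
    · rw [if_pos hx, flag_false_fix]
      simp [hx]

lemma dltA_eq (v : List Int) :
    dltA v = (List.range (v.length - 1)).map (fun k => v.getD (k + 1) 0 - v.getD k 0) := by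
  unfold dltA
  rw [PySem.List.pyRange_one]
  have hlen : (((v.length : Int)) - 1).toNat = v.length - 1 := by omega
  rw [hlen, List.map_map]
  refine List.map_congr_left ?_
  intro k _
  simp only [Function.comp]
  have h1 : (1 : Int) + (k : Int) = ((k + 1 : Nat) : Int) := by push_cast; ring
  have h2 : ((k + 1 : Nat) : Int) - 1 = ((k : Nat) : Int) := by push_cast; ring
  rw [h1, h2, PySem.List.pyGetD_natCast, PySem.List.pyGetD_natCast]

lemma solve_zero (v : List Int) (hz : ∀ d ∈ v, d = 0) : solve v = 0 := by
  rw [solve]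
  split
  · rfl
  · next h => exact absurd ((flag_iff v).mpr hz) h

lemma solve_nonzero (v : List Int) (hz : ¬ ∀ d ∈ v, d = 0) :
    solve v = solve (dltA v) + PySem.List.pyGetD v (-1) 0 := by
  rw [solve]
  split
  · next h => exact absurd ((flag_iff v).mp h) hz
  · rfl

lemma alt_zero (v : List Int) (hz : ∀ d ∈ v, d = 0) : solve_alt v = 0 := by
  rw [alt_eq]
  refine Finset.sum_eq_zero fun j hj => ?_
  have hj' : j < v.length := Finset.mem_range.mp hj
  have hlt : v.length - 1 - j < v.length := by omega
  have h0 : v.getD (v.length - 1 - j) 0 = 0 := by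
    rw [List.getD_eq_getElem?_getD, List.getElem?_eq_getElem hlt, Option.getD_some]
    exact hz _ (List.getElem_mem hlt)
  rw [h0, mul_zero]

lemma dlt_getD (v : List Int) (m j : Nat) (hm : v.length = m + 1) (hj : j < m) :
    (dltA v).getD (m - 1 - j) 0 = v.getD (m - j) 0 - v.getD (m - (j + 1)) 0 := by
  rw [dltA_eq, hm]
  have hidx : m - 1 - j < m + 1 - 1 := by omega
  rw [List.getD_eq_getElem?_getD, List.getElem?_map, List.getElem?_range hidx,
    Option.map_some, Option.getD_some]
  have e1 : m - 1 - j + 1 = m - j := by omega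
  have e2 : m - 1 - j = m - (j + 1) := by omega
  rw [e1, e2]

lemma key (N : Nat) : ∀ (v : List Int), v.length ≤ N → solve v = solve_alt v := by
  induction N with
  | zero =>
    intro v hv
    have hnil : v = [] := List.eq_nil_of_length_eq_zero (by omega)
    subst hnil
    rw [solve_zero [] (by simp), alt_zero [] (by simp)]
  | succ N ih =>
    intro v hv
    by_cases hz : ∀ d ∈ v, d = 0
    · rw [solve_zero v hz, alt_zero v hz]
    · have hne : v ≠ [] := by rintro rfl; exact hz (by simp)
      obtain ⟨m, hm⟩ : ∃ m, v.length = m + 1 :=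
        ⟨v.length - 1, by have := List.length_pos_of_ne_nil hne; omega⟩
      have hdlen : (dltA v).length = m := by rw [dltA_eq]; simp [hm]
      rw [solve_nonzero v hz, ih (dltA v) (by omega), alt_eq (dltA v), alt_eq v, hdlen, hm]
      refine Eq.trans ?_ (pascalS m (fun j => v.getD (m - j) 0)).symm
      congr 1
      · refine Finset.sum_congr rfl fun j hj => ?_
        have hj' : j < m := Finset.mem_range.mp hj
        rw [dlt_getD v m j hm hj']
      · rw [PySem.List.pyGetD_neg_one v 0 hne, List.getLast_eq_getElem,
          List.getD_eq_getElem?_getD,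
          List.getElem?_eq_getElem (show m - 0 < v.length by omega), Option.getD_some]
        simp [show v.length - 1 = m - 0 from by omega]

-- ===== VERDICT (by name: the statement is the Claim_ definition above) =====
theorem solve_spec : Claim_equal_solve := by
  intro v _
  unfold Spec_solve
  exact key v.length v le_rfl
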